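-- pv_equiv track=rewrite | github.com/daisyleedq/FFR105_Stochastic-Optimization-Algorithms | FFR105_CODE/PYTHON/TSP/distinct_paths.py | paths_not_cycling
-- ===== SOURCE A (Python) =====
-- def paths_not_cycling(pathsStr):
--     tmpPathsStr = [pathsStr[0]]
--     pathsStr = pathsStr[1:]
--
--     while pathsStr:
--         t = pathsStr[0]
--         pathsStr = pathsStr[1:]
--         tt = t + t
--         isCycling = False
--         for tp in tmpPathsStr:
--             if tt.count(tp) != 0 :
--                 isCycling = True
--         if not isCycling:
--             tmpPathsStr.append(t)
--
--     pathsStr = tmpPathsStr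
--
--     return pathsStr
-- ===== SOURCE B (Python) =====
-- def paths_not_cycling(pathsStr):
--     kept = []
--     by_len = {}  # length -> set of kept strings of that length
--     for t in pathsStr:
--         tt = t + t
--         if not any(tt[p:p + L] in ss
--                    for p in range(len(tt) + 1)
--                    for L, ss in by_len.items()):
--             kept.append(t)
--             by_len.setdefault(len(t), set()).add(t)
--     return kept
-- ===== Notes on version B (the rewrite author's own statement) =====
-- stated objective: faster
-- what changed: B replaces A's inner scan of all kept strings (a substring count per kept string) by a length-indexed dict of hash sets built once as strings are kept: each candidate t is tested by sliding over the start positions of t+t and looking the window slice up in the set for each kept length, so the per-element cost no longer grows with the number of kept strings.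
-- outside the precondition, e.g. on paths_not_cycling([]): A raises IndexError, B returns []
import Mathlib
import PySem

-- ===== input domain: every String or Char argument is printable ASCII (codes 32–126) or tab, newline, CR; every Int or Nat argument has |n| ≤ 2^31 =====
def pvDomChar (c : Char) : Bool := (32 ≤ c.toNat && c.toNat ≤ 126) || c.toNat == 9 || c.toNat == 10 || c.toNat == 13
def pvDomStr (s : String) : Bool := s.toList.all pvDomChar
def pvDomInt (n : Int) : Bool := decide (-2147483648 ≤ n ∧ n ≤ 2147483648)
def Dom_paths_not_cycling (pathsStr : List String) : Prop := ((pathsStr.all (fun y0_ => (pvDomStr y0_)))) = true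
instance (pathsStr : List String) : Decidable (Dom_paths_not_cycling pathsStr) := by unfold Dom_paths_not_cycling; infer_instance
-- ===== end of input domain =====

-- B replaces A's per-element scan of the kept list by a length-indexed dict of hash sets
-- probed at every start position of t+t; return value only, no mutation.
-- ===== PORT A =====
-- A's while loop: peel the head of the remaining list, test every kept string tp against t+t with count,
-- append t when the flag never fired.  't + t' on strings is ported as the code-point list append (exact on ASCII).
def pvLoopA : List String → List String → List String
  | [], tmp => tmp
  | t :: rest, tmp =>
      let tt := t.toList ++ t.toList
      let isCycling := tmp.foldl (fun b tp => if PySem.Chars.count tt tp.toList ≠ 0 then true else b) false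
      pvLoopA rest (if !isCycling then tmp ++ [t] else tmp)

def paths_not_cycling (pathsStr : List String) : List String :=
  match pathsStr with
  | [] => []   -- Python raises IndexError here (pathsStr[0]); excluded by Pre_
  | h :: rest => pvLoopA rest [h]

-- ===== PORT B =====
-- One step of B's loop: state = (kept, by_len); the any-test scans every slice start p of tt
-- and looks the slice tt[p:p+L] up in the set of kept strings of length L.
-- 'by_len.setdefault(len(t), set()).add(t)' is ported as the insert of the mutated set.
def pvStepB (st : List String × PySem.Dict Int (PySem.Set (List Char))) (t : String) :
    List String × PySem.Dict Int (PySem.Set (List Char)) :=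
  let tt := t.toList ++ t.toList
  let cycling := (PySem.List.pyRange 0 ((tt.length : Int) + 1) 1).any (fun p =>
      st.2.items.any (fun Lss =>
        PySem.Set.contains Lss.2 (PySem.List.slice tt (some p) (some (p + Lss.1)))))
  if !cycling then
    (st.1 ++ [t],
     st.2.insert ((t.toList.length : Int))
       (PySem.Set.add (st.2.getD ((t.toList.length : Int)) PySem.Set.empty) t.toList))
  else st

def paths_not_cycling_alt (pathsStr : List String) : List String :=
  (pathsStr.foldl pvStepB ([], PySem.Dict.empty)).1

-- ===== PRECONDITION & SPEC =====
-- A reads pathsStr[0] unconditionally, so it raises IndexError exactly on the empty list.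
def Pre_paths_not_cycling (pathsStr : List String) : Prop := pathsStr ≠ []
instance (pathsStr : List String) : Decidable (Pre_paths_not_cycling pathsStr) := by unfold Pre_paths_not_cycling; infer_instance
def pvWitness_paths_not_cycling : List String := ["ab", "ba", "cd"]

def Spec_paths_not_cycling (pathsStr : List String) (out : List String) : Prop := out = paths_not_cycling_alt pathsStr
instance (pathsStr : List String) (out : List String) : Decidable (Spec_paths_not_cycling pathsStr out) := by unfold Spec_paths_not_cycling; infer_instance

-- ===== CLAIM (what is proved, stated in full; the proofs are below) =====
def Claim_equal_paths_not_cycling : Prop := ∀ (pathsStr : List String), Dom_paths_not_cycling pathsStr → Pre_paths_not_cycling pathsStr → Spec_paths_not_cycling pathsStr (paths_not_cycling pathsStr)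

-- ===== LEMMAS AND PROOFS =====

-- count.go never decreases the accumulator
theorem pvCountGo_ge (sub : List Char) (fuel : Nat) (l : List Char) (acc : Nat) :
    acc ≤ PySem.Chars.count.go sub fuel l acc := by
  induction fuel generalizing l acc with
  | zero => simp [PySem.Chars.count.go]
  | succ n ih =>
    cases l with
    | nil => simp [PySem.Chars.count.go]
    | cons h t =>
      rw [PySem.Chars.count.go]
      split
      · exact le_trans (Nat.le_succ acc) (ih _ _)
      · exact ih _ _

theorem pvCountGo_eq_iff (sub : List Char) (hsub : sub ≠ []) (fuel : Nat) (l : List Char)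
    (hf : l.length ≤ fuel) (acc : Nat) :
    (PySem.Chars.count.go sub fuel l acc = acc ↔ ¬ sub <:+: l) := by
  induction fuel generalizing l acc with
  | zero =>
    have : l = [] := by cases l <;> simp_all
    subst this
    simp [PySem.Chars.count.go]
    intro h; exact hsub h
  | succ n ih =>
    cases l with
    | nil =>
      simp [PySem.Chars.count.go]
      intro h
      exact hsub h
    | cons h t =>
      rw [PySem.Chars.count.go]
      have hinfix : sub <:+: (h :: t) ↔ sub <+: (h :: t) ∨ sub <:+: t := List.infix_cons_iff
      split
      · rename_i hp
        have h1 : acc + 1 ≤ PySem.Chars.count.go sub n (List.drop sub.length (h :: t)) (acc + 1) := pvCountGo_ge _ _ _ _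
        constructor
        · intro he; omega
        · intro hni
          exact absurd (hinfix.mpr (Or.inl (List.isPrefixOf_iff_prefix.mp hp))) hni
      · rename_i hp
        have := ih t (by simpa using Nat.le_of_succ_le_succ (by simpa using hf)) acc
        rw [this, hinfix]
        simp [List.isPrefixOf_iff_prefix] at hp
        tauto

-- 'tt.count(tp) != 0'  is  'tp is an infix of tt'
theorem pvCount_ne_zero_iff (s sub : List Char) :
    (PySem.Chars.count s sub ≠ 0) ↔ sub <:+: s := by
  unfold PySem.Chars.count
  by_cases hsub : sub = []
  · subst hsub; simp
  · simp only [List.isEmpty_iff, hsub, if_false]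
    rw [not_iff_comm, Iff.comm]
    exact pvCountGo_eq_iff sub hsub s.length s le_rfl 0

-- A's flag loop is true iff some kept string is an infix of tt
theorem pvFlag_iff (tmp : List String) (tt : List Char) :
    tmp.foldl (fun b tp => if PySem.Chars.count tt tp.toList ≠ 0 then true else b) false = true
      ↔ ∃ tp ∈ tmp, tp.toList <:+: tt := by
  have h := PySem.List.foldl_if_true_eq
      (l := tmp) (b := false)
      (p := fun tp => decide (PySem.Chars.count tt tp.toList ≠ 0))
  simp only [decide_eq_true_eq] at h
  rw [h]
  simp only [Bool.false_or, List.any_eq_true, decide_eq_true_eq]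
  constructor
  · rintro ⟨tp, h1, h2⟩; exact ⟨tp, h1, (pvCount_ne_zero_iff _ _).mp h2⟩
  · rintro ⟨tp, h1, h2⟩; exact ⟨tp, h1, (pvCount_ne_zero_iff _ _).mpr h2⟩

-- any slice of xs is an infix of xs
theorem pvSlice_infix {α : Type} (xs : List α) (a b : Option Int) :
    PySem.List.slice xs a b <:+: xs := by
  unfold PySem.List.slice
  exact ((List.drop _ xs).take_prefix _).isInfix.trans (xs.drop_suffix _).isInfix

-- B's invariant: by_len indexes exactly the kept strings, keyed by their length
def pvInv (kept : List String) (d : PySem.Dict Int (PySem.Set (List Char))) : Prop :=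
  (∀ L ss, (L, ss) ∈ d.items → ∀ c ∈ ss, (∃ tp ∈ kept, tp.toList = c) ∧ ((c.length : Int) = L)) ∧
  (∀ tp ∈ kept, ∃ ss, d.get? ((tp.toList.length : Int)) = some ss ∧ tp.toList ∈ ss)

-- under the invariant, B's position-scan test is A's any-kept-infix test
theorem pvTestB_iff (kept : List String) (d : PySem.Dict Int (PySem.Set (List Char)))
    (hInv : pvInv kept d) (tt : List Char) :
    ((PySem.List.pyRange 0 ((tt.length : Int) + 1) 1).any (fun p =>
      d.items.any (fun Lss =>
        PySem.Set.contains Lss.2 (PySem.List.slice tt (some p) (some (p + Lss.1))))) = true)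
      ↔ ∃ tp ∈ kept, tp.toList <:+: tt := by
  simp only [List.any_eq_true, PySem.Set.contains, List.contains_iff_mem,
    PySem.List.mem_pyRange_one]
  constructor
  · rintro ⟨p, _, ⟨L, ss⟩, hmem, hc⟩
    obtain ⟨⟨tp, htp, heq⟩, -⟩ := hInv.1 L ss hmem _ hc
    exact ⟨tp, htp, heq ▸ pvSlice_infix tt _ _⟩
  · rintro ⟨tp, htp, hinf⟩
    obtain ⟨s, u, hsu⟩ := hinf
    obtain ⟨ss, hget, hmem⟩ := hInv.2 tp htp
    refine ⟨(s.length : Int), ⟨by positivity, ?_⟩,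
      ((tp.toList.length : Int), ss), PySem.Dict.mem_items_of_get?_eq_some d hget, ?_⟩
    · have : s.length + tp.toList.length + u.length = tt.length := by
        rw [← hsu]; simp; omega
      omega
    · rw [PySem.List.slice_natCast_add tt s.length tp.toList.length, ← hsu,
        List.append_assoc, List.drop_left, List.take_left]
      exact hmem

-- membership in Set.add
theorem pvMem_add {α : Type} [BEq α] [LawfulBEq α] (s : PySem.Set α) (x c : α) :
    c ∈ PySem.Set.add s x ↔ c ∈ s ∨ c = x := by
  unfold PySem.Set.add
  split
  · rename_i h
    simp only [PySem.Set.contains, List.contains_iff_mem] at h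
    constructor
    · exact Or.inl
    · rintro (h1 | rfl) <;> [exact h1; exact h]
  · simp [or_comm]

-- the invariant is preserved when B keeps a string
theorem pvInv_step (kept : List String) (d : PySem.Dict Int (PySem.Set (List Char))) (t : String)
    (h : pvInv kept d) :
    pvInv (kept ++ [t])
      (d.insert ((t.toList.length : Int))
        (PySem.Set.add (d.getD ((t.toList.length : Int)) PySem.Set.empty) t.toList)) := by
  constructor
  · intro L ss hmem c hc
    rw [PySem.Dict.mem_items_insert] at hmem
    rcases hmem with heq | ⟨hold, -⟩
    · obtain ⟨hL, hss⟩ := Prod.mk.injEq .. ▸ heq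
      subst hss
      rcases (pvMem_add _ _ _).mp hc with hcs | rfl
      · cases hg : d.get? ((t.toList.length : Int)) with
        | none => rw [PySem.Dict.getD, hg] at hcs; simp [PySem.Set.empty] at hcs
        | some ss1 =>
          rw [PySem.Dict.getD, hg] at hcs
          obtain ⟨⟨tp, htp, heq'⟩, hlen⟩ :=
            h.1 _ ss1 (PySem.Dict.mem_items_of_get?_eq_some d hg) c hcs
          exact ⟨⟨tp, List.mem_append_left _ htp, heq'⟩, hL ▸ hlen⟩
      · exact ⟨⟨t, List.mem_append_right _ (List.mem_singleton.mpr rfl), rfl⟩, hL ▸ rfl⟩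
    · obtain ⟨⟨tp, htp, heq'⟩, hlen⟩ := h.1 L ss hold c hc
      exact ⟨⟨tp, List.mem_append_left _ htp, heq'⟩, hlen⟩
  · intro tp hmem
    rcases List.mem_append.mp hmem with htp | htp
    · obtain ⟨ss, hget, hm⟩ := h.2 tp htp
      by_cases he : ((tp.toList.length : Int)) = ((t.toList.length : Int))
      · rw [he]
        refine ⟨_, PySem.Dict.get?_insert_self d _ _, ?_⟩
        rw [he] at hget
        rw [PySem.Dict.getD, hget]
        exact (pvMem_add _ _ _).mpr (Or.inl hm)
      · exact ⟨ss, (PySem.Dict.get?_insert_of_ne d _ he).trans hget, hm⟩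
    · rw [List.mem_singleton.mp htp]
      exact ⟨_, PySem.Dict.get?_insert_self d _ _, (pvMem_add _ _ _).mpr (Or.inr rfl)⟩

-- the two loops agree from any invariant-respecting state
theorem pvLoop_eq (rest : List String) (kept : List String)
    (d : PySem.Dict Int (PySem.Set (List Char))) (h : pvInv kept d) :
    pvLoopA rest kept = (rest.foldl pvStepB (kept, d)).1 := by
  induction rest generalizing kept d with
  | nil => rfl
  | cons t rest ih =>
    rw [pvLoopA, List.foldl_cons]
    have htest : (kept.foldl (fun b tp =>
        if PySem.Chars.count (t.toList ++ t.toList) tp.toList ≠ 0 then true else b) false)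
        = ((PySem.List.pyRange 0 (((t.toList ++ t.toList).length : Int) + 1) 1).any (fun p =>
          d.items.any (fun Lss =>
            PySem.Set.contains Lss.2
              (PySem.List.slice (t.toList ++ t.toList) (some p) (some (p + Lss.1)))))) := by
      rw [Bool.eq_iff_iff, pvFlag_iff]
      exact (pvTestB_iff kept d h (t.toList ++ t.toList)).symm
    show pvLoopA rest _ = _
    unfold pvStepB
    simp only
    rw [← htest]
    cases hb : (kept.foldl (fun b tp =>
        if PySem.Chars.count (t.toList ++ t.toList) tp.toList ≠ 0 then true else b) false) with
    | false =>
      simp only [Bool.not_false]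
      exact ih _ _ (pvInv_step kept d t h)
    | true =>
      simp only [Bool.not_true]
      exact ih _ _ h

-- the initial state after B's first iteration satisfies the invariant
theorem pvInv_empty : pvInv [] PySem.Dict.empty := by
  constructor
  · intro L ss hmem; simp [PySem.Dict.empty] at hmem
  · intro tp htp; simp at htp

-- ===== VERDICT (by name: the statement is the Claim_ definition above) =====
theorem paths_not_cycling_spec : Claim_equal_paths_not_cycling := by
  intro pathsStr _ hpre
  unfold Spec_paths_not_cycling
  match pathsStr with
  | [] => exact absurd rfl hpre
  | h :: rest =>
    show pvLoopA rest [h] = paths_not_cycling_alt (h :: rest)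
    unfold paths_not_cycling_alt
    rw [List.foldl_cons]
    have hstep : pvStepB ([], PySem.Dict.empty) h
        = ([h], PySem.Dict.empty.insert ((h.toList.length : Int))
            (PySem.Set.add (PySem.Dict.empty.getD ((h.toList.length : Int)) PySem.Set.empty)
              h.toList)) := by
      unfold pvStepB
      simp [PySem.Dict.empty]
    rw [hstep]
    exact pvLoop_eq rest [h] _ (pvInv_step [] PySem.Dict.empty h pvInv_empty)
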